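-- pv_equiv track=rewrite | github.com/Vraj-Data-Scientist/DSA-Progress | Strings/10.Maximum Nesting Depth of the Parentheses(1614).py | maxDepth_optimal
-- ===== SOURCE A (Python) =====
-- def maxDepth_optimal(s: str) -> int:
--     maxi = 0
--     counter = 0
--     for char in s:
--         if char == '(':
--             counter += 1
--         elif char == ')':
--             counter -= 1
--         maxi = max(maxi, counter)
--     return maxi
-- ===== SOURCE B (Python) =====
-- def maxDepth_optimal(s: str) -> int:
--     # Divide and conquer: for a segment return (total, best) where total is the
--     # sum of +1/-1 increments over the segment and best is the maximum prefix
--     # sum of the segment (including the empty prefix, hence best >= 0).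
--     # Combine rule: best(L+R) = max(best(L), total(L) + best(R)).
--     def go(t):
--         if len(t) == 0:
--             return (0, 0)
--         if len(t) == 1:
--             d = 1 if t == '(' else (-1 if t == ')' else 0)
--             return (d, max(0, d))
--         mid = len(t) // 2
--         t1, b1 = go(t[:mid])
--         t2, b2 = go(t[mid:])
--         return (t1 + t2, max(b1, t1 + b2))
--     return go(s)[1]
-- ===== Notes on version B (the rewrite author's own statement) =====
-- stated objective: alternative
-- what changed: B replaces A's single left-to-right counter-and-max loop by a divide-and-conquer recursion that splits the string in half and combines (segment total, max prefix sum) pairs with best(L+R)=max(best(L), total(L)+best(R)).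
import Mathlib
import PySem

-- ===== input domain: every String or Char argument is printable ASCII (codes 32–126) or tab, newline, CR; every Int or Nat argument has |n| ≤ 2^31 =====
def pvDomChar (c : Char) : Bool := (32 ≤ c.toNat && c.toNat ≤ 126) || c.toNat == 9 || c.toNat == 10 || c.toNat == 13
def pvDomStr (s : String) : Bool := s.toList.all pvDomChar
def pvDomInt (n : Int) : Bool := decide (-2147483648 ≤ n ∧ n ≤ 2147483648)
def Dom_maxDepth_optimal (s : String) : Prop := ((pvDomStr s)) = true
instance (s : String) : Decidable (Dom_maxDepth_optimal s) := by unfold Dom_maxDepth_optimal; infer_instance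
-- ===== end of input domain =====

-- B computes the answer by divide-and-conquer on string halves, combining
-- (segment total, max prefix sum) pairs, instead of A's left-to-right
-- counter-and-max loop; objective: alternative algorithm.

-- ===== PORT A =====
def maxDepth_optimal (s : String) : Int :=
  (s.toList.foldl (fun (p : Int × Int) c =>
      let counter : Int := if c = '(' then p.2 + 1 else if c = ')' then p.2 - 1 else p.2
      (max p.1 counter, counter)) (0, 0)).1

-- ===== PORT B =====
-- per-character increment, as in B's one-element base case
def pvInc (c : Char) : Int := if c = '(' then 1 else if c = ')' then -1 else 0

-- B's go: returns (total of increments, max prefix sum incl. empty prefix)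
def pvGo : List Char → Int × Int
  | [] => (0, 0)
  | [c] => let d := pvInc c; (d, max 0 d)
  | c1 :: c2 :: rest =>
    let t := c1 :: c2 :: rest
    let mid := t.length / 2
    let p1 := pvGo (t.take mid)
    let p2 := pvGo (t.drop mid)
    (p1.1 + p2.1, max p1.2 (p1.1 + p2.2))
termination_by t => t.length
decreasing_by
  all_goals simp [List.length_take, List.length_drop]; omega

def maxDepth_optimal_alt (s : String) : Int := (pvGo s.toList).2

-- ===== PRECONDITION & SPEC =====
def Spec_maxDepth_optimal (s : String) (out : Int) : Prop := out = maxDepth_optimal_alt s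
instance (s : String) (out : Int) : Decidable (Spec_maxDepth_optimal s out) := by unfold Spec_maxDepth_optimal; infer_instance

-- ===== CLAIM (what is proved, stated in full; the proofs are below) =====
def Claim_equal_maxDepth_optimal : Prop := ∀ (s : String), Dom_maxDepth_optimal s → Spec_maxDepth_optimal s (maxDepth_optimal s)

-- ===== LEMMAS AND PROOFS =====

-- total of increments of a segment
def pvT (t : List Char) : Int := (t.map pvInc).sum
-- max prefix sum of a segment, including the empty prefix (hence ≥ 0)
def pvP : List Char → Int
  | [] => 0
  | c :: t => max 0 (pvInc c + pvP t)

theorem pvP_nonneg (t : List Char) : 0 ≤ pvP t := by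
  cases t with
  | nil => simp [pvP]
  | cons c t => simp [pvP]

theorem pvT_append (l r : List Char) : pvT (l ++ r) = pvT l + pvT r := by
  simp [pvT]

theorem pvP_append (l r : List Char) : pvP (l ++ r) = max (pvP l) (pvT l + pvP r) := by
  induction l with
  | nil =>
    simp only [List.nil_append, pvP, pvT, List.map_nil, List.sum_nil]
    have := pvP_nonneg r
    omega
  | cons c l ih =>
    simp only [List.cons_append, pvP, ih, pvT, List.map_cons, List.sum_cons]
    omega

theorem pvGo_eq (t : List Char) : pvGo t = (pvT t, pvP t) := by
  fun_induction pvGo t with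
  | case1 => simp [pvT, pvP]
  | case2 c =>
    show (pvInc c, max 0 (pvInc c)) = (pvT [c], pvP [c])
    simp [pvT, pvP]
  | case3 c1 c2 rest t mid p1 p2 ihT ihD =>
    show ((pvGo (t.take mid)).1 + (pvGo (t.drop mid)).1,
        max (pvGo (t.take mid)).2 ((pvGo (t.take mid)).1 + (pvGo (t.drop mid)).2))
      = (pvT (c1 :: c2 :: rest), pvP (c1 :: c2 :: rest))
    rw [ihT, ihD]
    have h2 : (c1 :: c2 :: rest) = t.take mid ++ t.drop mid :=
      (List.take_append_drop mid t).symm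
    conv_rhs => rw [h2]
    rw [pvT_append, pvP_append]

-- A's loop from state (m, c) with c ≤ m (the loop invariant) yields max m (c + pvP t).
theorem pvA_fold (t : List Char) : ∀ (m c : Int), c ≤ m →
    (t.foldl (fun (p : Int × Int) ch =>
      let counter : Int := if ch = '(' then p.2 + 1 else if ch = ')' then p.2 - 1 else p.2
      (max p.1 counter, counter)) (m, c)).1 = max m (c + pvP t) := by
  induction t with
  | nil => intro m c h; simp [pvP]; omega
  | cons ch t ih =>
    intro m c h
    have hstep : (if ch = '(' then c + 1 else if ch = ')' then c - 1 else c) = c + pvInc ch := by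
      unfold pvInc; split_ifs <;> ring
    simp only [List.foldl_cons, hstep]
    rw [ih (max m (c + pvInc ch)) (c + pvInc ch) (le_max_right _ _)]
    have hP := pvP_nonneg t
    simp only [pvP]
    omega

-- ===== VERDICT (by name: the statement is the Claim_ definition above) =====
theorem maxDepth_optimal_spec : Claim_equal_maxDepth_optimal := by
  intro s _
  unfold Spec_maxDepth_optimal maxDepth_optimal maxDepth_optimal_alt
  rw [pvA_fold s.toList 0 0 le_rfl, pvGo_eq]
  have := pvP_nonneg s.toList
  simp; omega
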